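-- pv_equiv track=rewrite | github.com/ctrlaltwilso/python-challenges | navigate-arrays-challenges/array-traversal.py | solution
-- ===== SOURCE A (Python) =====
-- def solution(numbers):
--     position = 0
--     final_output = []
--
--     while position < len(numbers):
--         if numbers[position] < 0:
--             final_output.append(-1)
--         else:
--             found_obstacle = False
--             for i in range(position + 1, min(position + numbers[position] + 1, len(numbers))):
--                 if numbers[i] < 0:
--                     final_output.append(i)
--                     found_obstacle = True
--                     break
--             if not found_obstacle:
--                 final_output.append(numbers[position])
--         position += 1
--
--     return final_output
-- ===== SOURCE B (Python) =====
-- def solution(numbers):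
--     n = len(numbers)
--     next_neg = [n] * (n + 1)
--     for i in range(n - 1, -1, -1):
--         next_neg[i] = i if numbers[i] < 0 else next_neg[i + 1]
--
--     def step(pos, v):
--         if v < 0:
--             return -1
--         j = next_neg[pos + 1]
--         return j if j < n and j <= pos + v else v
--
--     return [step(p, v) for p, v in enumerate(numbers)]
-- ===== Notes on version B (the rewrite author's own statement) =====
-- stated objective: faster
-- what changed: Replaced the per-position forward rescan of up to value-many elements by a single right-to-left precomputed next-negative-index table, so each position is answered with an O(1) window check.
import Mathlib
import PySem

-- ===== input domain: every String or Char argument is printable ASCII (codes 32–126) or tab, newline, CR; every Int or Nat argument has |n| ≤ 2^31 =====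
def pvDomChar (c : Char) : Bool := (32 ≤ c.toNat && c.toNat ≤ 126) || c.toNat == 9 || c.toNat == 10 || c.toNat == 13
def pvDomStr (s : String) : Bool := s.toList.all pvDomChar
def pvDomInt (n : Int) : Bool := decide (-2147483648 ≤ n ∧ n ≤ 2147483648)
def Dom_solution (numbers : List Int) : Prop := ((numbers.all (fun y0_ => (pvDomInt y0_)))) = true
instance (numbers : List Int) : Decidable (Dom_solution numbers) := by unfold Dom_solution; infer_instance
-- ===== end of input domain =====

-- B replaces A's per-position forward rescan by a single right-to-left precomputed
-- next-negative-index table with an O(1) window check per position (asymptotically faster).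

-- ===== PORT A =====
-- inner 'for i in range(...)' with break: returns the first index whose element is negative
def solInner (numbers : List Int) : List Int → Option Int
  | [] => none
  | i :: rest =>
      if PySem.List.pyGetD numbers i 0 < 0 then some i else solInner numbers rest

-- the 'while position < len(numbers)' loop, appending to final_output (acc)
def solLoop (numbers : List Int) (position : Nat) (acc : List Int) : List Int :=
  if _h : position < numbers.length then
    let v := numbers.getD position 0
    let x : Int :=
      if v < 0 then -1
      else
        match solInner numbers
            (PySem.List.pyRange ((position : Int) + 1)
              (min ((position : Int) + v + 1) (numbers.length : Int)) 1) with
        | some i => i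
        | none => v
    solLoop numbers (position + 1) (acc ++ [x])
  else acc
termination_by numbers.length - position

def solution (numbers : List Int) : List Int :=
  solLoop numbers 0 []

-- ===== PORT B =====
-- next_neg built right-to-left: entry k = first index j ≥ k with numbers[j] < 0, sentinel n;
-- i is the absolute index of the head of the remaining list
def nnList : List Int → Int → List Int
  | [], i => [i]
  | v :: rest, i =>
      let t := nnList rest (i + 1)
      (if v < 0 then i else t.headD i) :: t

def solution_alt (numbers : List Int) : List Int :=
  let n : Int := PySem.List.len numbers
  let nexts := nnList numbers 0
  (PySem.List.enumerate numbers 0).map (fun pv =>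
    if pv.2 < 0 then -1
    else
      let j := PySem.List.pyGetD nexts (pv.1 + 1) n
      if j < n ∧ j ≤ pv.1 + pv.2 then j else pv.2)

-- ===== PRECONDITION & SPEC =====
def Spec_solution (numbers : List Int) (out : List Int) : Prop := out = solution_alt numbers
instance (numbers : List Int) (out : List Int) : Decidable (Spec_solution numbers out) := by unfold Spec_solution; infer_instance

-- ===== CLAIM (what is proved, stated in full; the proofs are below) =====
def Claim_equal_solution : Prop := ∀ (numbers : List Int), Dom_solution numbers → Spec_solution numbers (solution numbers)

-- ===== LEMMAS AND PROOFS =====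

theorem nnList_length (l : List Int) (i : Int) : (nnList l i).length = l.length + 1 := by
  induction l generalizing i with
  | nil => simp [nnList]
  | cons v rest ih => simp [nnList, ih]

theorem nnList_getD_last (l : List Int) (i : Int) :
    (nnList l i).getD l.length 0 = i + l.length := by
  induction l generalizing i with
  | nil => simp [nnList]
  | cons v rest ih =>
      simp only [nnList, List.length_cons, List.getD_cons_succ]
      rw [ih (i + 1)]
      push_cast; ring

theorem nnList_getD_step (l : List Int) (i : Int) (k : Nat) (hk : k < l.length) :
    (nnList l i).getD k 0 =
      if l.getD k 0 < 0 then i + k else (nnList l i).getD (k + 1) 0 := by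
  induction l generalizing i k with
  | nil => simp at hk
  | cons v rest ih =>
      cases k with
      | zero =>
          simp only [nnList, List.getD_cons_zero, List.getD_cons_succ]
          obtain ⟨a, t, ht⟩ : ∃ a t, nnList rest (i + 1) = a :: t := by
            cases rest <;> exact ⟨_, _, rfl⟩
          simp [ht]
      | succ k =>
          simp only [nnList, List.getD_cons_succ]
          rw [ih (i + 1) k (by simpa using hk)]
          push_cast; ring_nf

theorem solInner_append (numbers xs ys : List Int) :
    solInner numbers (xs ++ ys) =
      match solInner numbers xs with
      | some i => some i
      | none => solInner numbers ys := by
  induction xs with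
  | nil => simp [solInner]
  | cons a xs ih =>
      simp only [List.cons_append, solInner]
      split_ifs <;> simp [ih]

theorem solInner_mem (numbers xs : List Int) (i : Int)
    (h : solInner numbers xs = some i) : i ∈ xs := by
  induction xs with
  | nil => simp [solInner] at h
  | cons a xs ih =>
      simp only [solInner] at h
      split_ifs at h with ha
      · cases h; simp
      · exact List.mem_cons_of_mem _ (ih h)

-- windowed scan from the full-suffix scan
theorem solInner_window (numbers : List Int) (a m : Int)
    (h1 : a ≤ m) (h2 : m ≤ (numbers.length : Int)) :
    solInner numbers (PySem.List.pyRange a m 1) =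
      match solInner numbers (PySem.List.pyRange a (numbers.length : Int) 1) with
      | some i => if i < m then some i else none
      | none => none := by
  rw [PySem.List.pyRange_one_append a m (numbers.length : Int) h1 h2,
    solInner_append]
  cases hw : solInner numbers (PySem.List.pyRange a m 1) with
  | some i =>
      have := (PySem.List.mem_pyRange_one).1 (solInner_mem _ _ _ hw)
      simp [this.2]
  | none =>
      cases hr : solInner numbers (PySem.List.pyRange m (numbers.length : Int) 1) with
      | some i =>
          have := (PySem.List.mem_pyRange_one).1 (solInner_mem _ _ _ hr)
          simp [not_lt.2 this.1]
      | none => simp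

-- the table entry at k is exactly the full-suffix scan result (sentinel n)
theorem nnList_eq_scan (numbers : List Int) (k : Nat) (hk : k ≤ numbers.length) :
    (nnList numbers 0).getD k 0 =
      match solInner numbers (PySem.List.pyRange (k : Int) (numbers.length : Int) 1) with
      | some i => i
      | none => (numbers.length : Int) := by
  induction hfuel : numbers.length - k generalizing k with
  | zero =>
      have hk' : k = numbers.length := by omega
      subst hk'
      rw [PySem.List.pyRange_one_eq_nil (by omega)]
      simpa [solInner] using nnList_getD_last numbers 0
  | succ fuel ih =>
      have hklt : k < numbers.length := by omega
      rw [PySem.List.pyRange_one_cons (by exact_mod_cast hklt)]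
      rw [nnList_getD_step numbers 0 k hklt]
      simp only [solInner, PySem.List.pyGetD_natCast]
      split_ifs with hneg
      · simp
      · have : ((k : Int) + 1) = ((k + 1 : Nat) : Int) := by push_cast; ring
        rw [this, ih (k + 1) (by omega) (by omega)]

-- the per-position value A computes equals B's per-position function
theorem pointwise (numbers : List Int) (pos : Nat) (h : pos < numbers.length) :
    (if numbers.getD pos 0 < 0 then (-1 : Int)
     else
       match solInner numbers
           (PySem.List.pyRange ((pos : Int) + 1)
             (min ((pos : Int) + numbers.getD pos 0 + 1) (numbers.length : Int)) 1) with
       | some i => i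
       | none => numbers.getD pos 0) =
    (if numbers[pos] < 0 then (-1 : Int)
     else
       let j := PySem.List.pyGetD (nnList numbers 0) ((pos : Int) + 1) (numbers.length : Int)
       if j < (numbers.length : Int) ∧ j ≤ (pos : Int) + numbers[pos] then j
       else numbers[pos]) := by
  rw [List.getD_eq_getElem numbers 0 h]
  set v := numbers[pos] with hv
  by_cases hneg : v < 0
  · simp [hneg]
  · simp only [if_neg hneg]
    have hv0 : 0 ≤ v := not_lt.1 hneg
    have hj : PySem.List.pyGetD (nnList numbers 0) ((pos : Int) + 1) (numbers.length : Int)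
        = (nnList numbers 0).getD (pos + 1) 0 := by
      have hcast : ((pos : Int) + 1) = ((pos + 1 : Nat) : Int) := by push_cast; ring
      rw [hcast, PySem.List.pyGetD_natCast]
      have hlen : pos + 1 < (nnList numbers 0).length := by
        rw [nnList_length]; omega
      rw [List.getD_eq_getElem _ _ hlen, List.getD_eq_getElem _ _ hlen]
    rw [hj, nnList_eq_scan numbers (pos + 1) (by omega)]
    have hcast : ((pos + 1 : Nat) : Int) = (pos : Int) + 1 := by push_cast; ring
    rw [hcast]
    rw [solInner_window numbers ((pos : Int) + 1)
      (min ((pos : Int) + v + 1) (numbers.length : Int)) (by omega) (by omega)]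
    cases hfull : solInner numbers
        (PySem.List.pyRange ((pos : Int) + 1) (numbers.length : Int) 1) with
    | some i =>
        have hmem := (PySem.List.mem_pyRange_one).1 (solInner_mem _ _ _ hfull)
        by_cases hle : i ≤ (pos : Int) + v
        · have : i < min ((pos : Int) + v + 1) (numbers.length : Int) := by omega
          simp [this, hmem.2, hle]
        · have : ¬ i < min ((pos : Int) + v + 1) (numbers.length : Int) := by omega
          simp [this, hle]
    | none => simp

-- B's per-element function, named for the outer-loop induction
def fB (numbers : List Int) (pv : Int × Int) : Int :=
  if pv.2 < 0 then -1
  else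
    let j := PySem.List.pyGetD (nnList numbers 0) (pv.1 + 1) (numbers.length : Int)
    if j < (numbers.length : Int) ∧ j ≤ pv.1 + pv.2 then j else pv.2

theorem solLoop_eq (numbers : List Int) (pos : Nat) (acc : List Int)
    (hpos : pos ≤ numbers.length) :
    solLoop numbers pos acc =
      acc ++ ((PySem.List.enumerate numbers 0).drop pos).map (fB numbers) := by
  induction hfuel : numbers.length - pos generalizing pos acc with
  | zero =>
      have : pos = numbers.length := by omega
      subst this
      rw [solLoop]
      simp [List.drop_eq_nil_of_le, PySem.List.length_enumerate]
  | succ fuel ih =>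
      have h : pos < numbers.length := by omega
      rw [solLoop, dif_pos h, ih (pos + 1) _ (by omega) (by omega)]
      have hlen : pos < (PySem.List.enumerate numbers 0).length := by
        rw [PySem.List.length_enumerate]; exact h
      rw [List.drop_eq_getElem_cons hlen]
      simp only [List.map_cons, List.append_assoc, List.cons_append, List.nil_append]
      congr 2
      rw [PySem.List.getElem_enumerate]
      simp only [fB, zero_add]
      exact pointwise numbers pos h

-- ===== VERDICT (by name: the statement is the Claim_ definition above) =====
theorem solution_spec : Claim_equal_solution := by
  intro numbers _
  show solution numbers = solution_alt numbers
  rw [solution, solLoop_eq numbers 0 [] (Nat.zero_le _)]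
  simp only [List.drop_zero, List.nil_append]
  rw [solution_alt]
  simp only [PySem.List.len_eq]
  rfl
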